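-- pv_equiv track=rewrite | github.com/enzeas/EcDNAFinder | Recycle/ecDNA.pipe.v1.py | cigarmerge
-- ===== SOURCE A (Python) =====
-- def cigarmerge(ct, indel=100000, skip=1000000000, hard=100000, pad=1000000000, match='Q'):
--     ctN = ct[:1]
--     for i in ct[1:]:
--         if match=='Q':
--             if ( i[1] <=indel and i[0] ==1 ):
--                 i = (0, i[1])
--             elif ( i[1] <=indel and i[0] ==2 ):
--                 i = (0, 0)
--             elif ( i[1] <=skip and i[0] ==3 ):
--                 i = (0, 0)
--             elif ( i[1] <=hard and i[0] ==5 ):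
--                 i = (0, 0)
--             elif ( i[1] <=pad and i[0] ==6 ):
--                 i = (0, 0)
--             else:
--                 i = i
--
--         elif match=='R':
--             if ( i[1] <=indel and i[0] ==1 ):
--                 i = (0, 0)
--             elif ( i[1] <=indel and i[0] ==2 ):
--                 i = (0, i[1])
--             elif ( i[1] <=skip and i[0] ==3 ):
--                 i = (0, i[1])
--             elif ( i[1] <=hard and i[0] ==5 ):
--                 i = (0, 0)
--             elif ( i[1] <=pad and i[0] ==6 ):
--                 i = (0, 0)
--             else:
--                 i = i
--
--         if ( ctN[-1][0]==0 and i[0]==0 ):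
--             ctN[-1] = (ctN[-1][0] + i[0], ctN[-1][1] + i[1])
--         else:
--             ctN.append(i)
--     return ctN
-- ===== SOURCE B (Python) =====
-- def _xform(i, indel, skip, hard, pad, match):
--     # zero-out rule: op has a per-mode threshold; kept length only for the mode's 'keep' ops
--     if match not in ('Q', 'R'):
--         return i
--     thr = {1: indel, 2: indel, 3: skip, 5: hard, 6: pad}.get(i[0])
--     if thr is None or i[1] > thr:
--         return i
--     keep = (match == 'Q' and i[0] == 1) or (match == 'R' and i[0] in (2, 3))
--     return (0, i[1] if keep else 0)
--
--
-- def cigarmerge(ct, indel=100000, skip=1000000000, hard=100000, pad=1000000000, match='Q'):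
--     # stage 1: first element verbatim, transform the rest
--     tf = ct[:1] + [_xform(i, indel, skip, hard, pad, match) for i in ct[1:]]
--     # stage 2: run-length grouping — each maximal run of zero-op entries collapses
--     # to one (0, sum of lengths); non-zero entries pass through unchanged
--     out = []
--     n = len(tf)
--     k = 0
--     while k < n:
--         if tf[k][0] == 0:
--             j = k
--             while j < n and tf[j][0] == 0:
--                 j += 1
--             out.append((0, sum(x[1] for x in tf[k:j])))
--             k = j
--         else:
--             out.append(tf[k])
--             k += 1
--     return out
-- ===== Notes on version B (the rewrite author's own statement) =====
-- stated objective: alternative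
-- what changed: replaces A's single fused loop (per-mode elif transform followed by mutate-the-last-element pairwise merge) by a two-stage pipeline: a threshold-table/keep-predicate transform of every element after the first, then run-length grouping that collapses each maximal run of zero-op entries into one (0, sum-of-lengths) tuple via slice summation
import Mathlib
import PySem

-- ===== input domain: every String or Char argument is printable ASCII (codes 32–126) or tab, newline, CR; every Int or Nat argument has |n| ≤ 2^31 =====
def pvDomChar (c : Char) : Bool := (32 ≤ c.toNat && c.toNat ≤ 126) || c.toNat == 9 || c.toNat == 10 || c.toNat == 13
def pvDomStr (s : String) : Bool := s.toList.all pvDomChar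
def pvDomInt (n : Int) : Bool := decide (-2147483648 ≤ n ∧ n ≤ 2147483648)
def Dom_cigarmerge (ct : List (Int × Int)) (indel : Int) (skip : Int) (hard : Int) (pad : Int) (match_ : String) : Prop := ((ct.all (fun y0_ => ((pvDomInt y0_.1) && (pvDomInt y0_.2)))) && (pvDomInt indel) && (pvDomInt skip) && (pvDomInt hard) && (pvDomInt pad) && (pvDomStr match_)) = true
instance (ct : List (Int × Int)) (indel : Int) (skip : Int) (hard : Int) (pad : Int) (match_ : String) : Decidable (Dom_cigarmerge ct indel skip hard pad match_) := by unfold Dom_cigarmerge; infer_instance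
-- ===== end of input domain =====

-- B restructures A's fused transform+merge loop as a staged pipeline: a per-element
-- threshold/keep transform, then run-length grouping that collapses each maximal run of
-- zero-op entries into one summed tuple; same values, same O(n) cost.


-- ===== PORT A =====
-- literal transliteration of A: ctN = ct[:1]; one fused loop over ct[1:] that rewrites i via
-- the elif chains, then merges into ctN[-1] or appends.
def cigarmerge (ct : List (Int × Int)) (indel : Int) (skip : Int) (hard : Int) (pad : Int) (match_ : String) : List (Int × Int) :=
  (ct.drop 1).foldl (fun ctN i0 =>
    let i : Int × Int :=
      if match_ = "Q" then
        if i0.2 ≤ indel ∧ i0.1 = 1 then (0, i0.2)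
        else if i0.2 ≤ indel ∧ i0.1 = 2 then (0, 0)
        else if i0.2 ≤ skip ∧ i0.1 = 3 then (0, 0)
        else if i0.2 ≤ hard ∧ i0.1 = 5 then (0, 0)
        else if i0.2 ≤ pad ∧ i0.1 = 6 then (0, 0)
        else i0
      else if match_ = "R" then
        if i0.2 ≤ indel ∧ i0.1 = 1 then (0, 0)
        else if i0.2 ≤ indel ∧ i0.1 = 2 then (0, i0.2)
        else if i0.2 ≤ skip ∧ i0.1 = 3 then (0, i0.2)
        else if i0.2 ≤ hard ∧ i0.1 = 5 then (0, 0)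
        else if i0.2 ≤ pad ∧ i0.1 = 6 then (0, 0)
        else i0
      else i0
    match ctN.getLast? with
    | some last =>
        if last.1 = 0 ∧ i.1 = 0 then ctN.dropLast ++ [(last.1 + i.1, last.2 + i.2)]
        else ctN ++ [i]
    | none => ctN ++ [i]) (ct.take 1)

-- ===== PORT B =====
-- _xform from Source B: per-op threshold lookup plus a 'keep length' predicate per mode.
def pvXform (indel skip hard pad : Int) (match_ : String) (i : Int × Int) : Int × Int :=
  if ¬ (match_ = "Q" ∨ match_ = "R") then i
  else
    let thr? : Option Int :=
      PySem.Dict.get? (PySem.Dict.ofList [(1, indel), (2, indel), (3, skip), (5, hard), (6, pad)]) i.1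
    match thr? with
    | none => i
    | some thr =>
        if thr < i.2 then i
        else
          let keep := (match_ = "Q" ∧ i.1 = 1) ∨ (match_ = "R" ∧ (i.1 = 2 ∨ i.1 = 3))
          (0, if keep then i.2 else 0)

-- the run-grouping while loop of Source B: a maximal run of zero-op entries collapses to one
-- (0, sum of lengths), a non-zero entry passes through.
def pvRuns : List (Int × Int) → List (Int × Int)
  | [] => []
  | x :: xs =>
      if x.1 = 0 then
        (0, x.2 + ((xs.takeWhile (fun y => y.1 = 0)).map Prod.snd).sum)
          :: pvRuns (xs.dropWhile (fun y => y.1 = 0))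
      else x :: pvRuns xs
termination_by l => l.length
decreasing_by
  · have := List.length_dropWhile_le (p := fun y : Int × Int => decide (y.1 = 0)) (l := xs)
    simpa using Nat.lt_succ_of_le this
  · simp

def cigarmerge_alt (ct : List (Int × Int)) (indel : Int) (skip : Int) (hard : Int) (pad : Int) (match_ : String) : List (Int × Int) :=
  pvRuns (ct.take 1 ++ (ct.drop 1).map (pvXform indel skip hard pad match_))

-- ===== PRECONDITION & SPEC =====
def Spec_cigarmerge (ct : List (Int × Int)) (indel : Int) (skip : Int) (hard : Int) (pad : Int) (match_ : String) (out : List (Int × Int)) : Prop := out = cigarmerge_alt ct indel skip hard pad match_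
instance (ct : List (Int × Int)) (indel : Int) (skip : Int) (hard : Int) (pad : Int) (match_ : String) (out : List (Int × Int)) : Decidable (Spec_cigarmerge ct indel skip hard pad match_ out) := by unfold Spec_cigarmerge; infer_instance

-- ===== CLAIM (what is proved, stated in full; the proofs are below) =====
def Claim_equal_cigarmerge : Prop := ∀ (ct : List (Int × Int)) (indel : Int) (skip : Int) (hard : Int) (pad : Int) (match_ : String), Dom_cigarmerge ct indel skip hard pad match_ → Spec_cigarmerge ct indel skip hard pad match_ (cigarmerge ct indel skip hard pad match_)

-- ===== LEMMAS AND PROOFS =====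

-- A's merge step, factored out for the proof.
def pvStepA (ctN : List (Int × Int)) (i : Int × Int) : List (Int × Int) :=
  match ctN.getLast? with
  | some last =>
      if last.1 = 0 ∧ i.1 = 0 then ctN.dropLast ++ [(last.1 + i.1, last.2 + i.2)]
      else ctN ++ [i]
  | none => ctN ++ [i]

-- the threshold-table lookup of pvXform, resolved per op-code.
theorem thr_get (indel skip hard pad op : Int) :
    PySem.Dict.get? (PySem.Dict.ofList [((1:Int),indel),(2,indel),(3,skip),(5,hard),(6,pad)]) op =
      if op = 1 then some indel else if op = 2 then some indel else if op = 3 then some skip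
      else if op = 5 then some hard else if op = 6 then some pad else none := by
  by_cases h1 : op = 1 <;> by_cases h2 : op = 2 <;> by_cases h3 : op = 3 <;>
    by_cases h5 : op = 5 <;> by_cases h6 : op = 6 <;>
    simp_all [PySem.Dict.ofList, PySem.Dict.update, PySem.Dict.get?_insert, PySem.Dict.get?_empty]

-- A's inline elif transform chain agrees with B's threshold/keep transform.
theorem xform_eq (indel skip hard pad : Int) (match_ : String) (i0 : Int × Int) :
    pvXform indel skip hard pad match_ i0 =
      (if match_ = "Q" then
        if i0.2 ≤ indel ∧ i0.1 = 1 then (0, i0.2)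
        else if i0.2 ≤ indel ∧ i0.1 = 2 then (0, 0)
        else if i0.2 ≤ skip ∧ i0.1 = 3 then (0, 0)
        else if i0.2 ≤ hard ∧ i0.1 = 5 then (0, 0)
        else if i0.2 ≤ pad ∧ i0.1 = 6 then (0, 0)
        else i0
      else if match_ = "R" then
        if i0.2 ≤ indel ∧ i0.1 = 1 then (0, 0)
        else if i0.2 ≤ indel ∧ i0.1 = 2 then (0, i0.2)
        else if i0.2 ≤ skip ∧ i0.1 = 3 then (0, i0.2)
        else if i0.2 ≤ hard ∧ i0.1 = 5 then (0, 0)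
        else if i0.2 ≤ pad ∧ i0.1 = 6 then (0, 0)
        else i0
      else i0) := by
  rcases i0 with ⟨op, ln⟩
  unfold pvXform
  rw [thr_get]
  by_cases hQ : match_ = "Q" <;> by_cases hR : match_ = "R"
  · rw [hQ] at hR; exact absurd hR (by decide)
  all_goals
    by_cases h1 : op = 1 <;> by_cases h2 : op = 2 <;> by_cases h3 : op = 3 <;>
      by_cases h5 : op = 5 <;> by_cases h6 : op = 6 <;>
      simp only [hQ, hR, h1, h2, h3, h5, h6, if_true, if_false, not_or, not_false_iff,
                 and_true, and_false, true_and, false_and,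
                 not_true_eq_false, or_self] <;>
      simp_all <;> split_ifs <;> simp_all <;> omega

-- A's fused loop equals the mapped transform fed to A's merge fold.
theorem cigarmerge_as_foldl (ct : List (Int × Int)) (indel skip hard pad : Int) (match_ : String) :
    cigarmerge ct indel skip hard pad match_ =
      ((ct.drop 1).map (pvXform indel skip hard pad match_)).foldl pvStepA (ct.take 1) := by
  rw [List.foldl_map]
  unfold cigarmerge
  congr 1
  funext ctN i0
  rw [xform_eq]
  rfl

-- pvStepA on a singleton seed, written as an if.
theorem stepA_singleton (y i : Int × Int) :
    pvStepA [y] i =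
      if y.1 = 0 ∧ i.1 = 0 then [((y.1 + i.1 : Int), (y.2 + i.2 : Int))] else [y] ++ [i] := by
  unfold pvStepA
  simp [List.getLast?]

-- pvStepA on a seed with a strict prefix, written as an if.
theorem stepA_concat (ys : List (Int × Int)) (y i : Int × Int) :
    pvStepA (ys ++ [y]) i =
      if y.1 = 0 ∧ i.1 = 0 then ys ++ [((y.1 + i.1 : Int), (y.2 + i.2 : Int))]
      else (ys ++ [y]) ++ [i] := by
  unfold pvStepA
  rw [List.getLast?_concat]
  simp only []
  split_ifs with h
  · rw [List.dropLast_concat]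
  · rfl

-- pvStepA only touches the last element: a strict prefix passes through the fold.
theorem foldl_stepA_prefix (l : List (Int × Int)) (ys : List (Int × Int)) (y : Int × Int) :
    l.foldl pvStepA (ys ++ [y]) = ys ++ l.foldl pvStepA [y] := by
  induction l generalizing ys y with
  | nil => rfl
  | cons i l ih =>
      simp only [List.foldl_cons, stepA_concat, stepA_singleton]
      split_ifs with h
      · exact ih ys _
      · rw [ih (ys ++ [y]) i, ih [y] i, List.append_assoc]

-- unfolding lemma for pvRuns on nil and on a cons cell.
theorem pvRuns_nil : pvRuns [] = [] := by rw [pvRuns]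

theorem pvRuns_cons (x : Int × Int) (xs : List (Int × Int)) :
    pvRuns (x :: xs) =
      if x.1 = 0 then
        (0, x.2 + ((xs.takeWhile (fun y => y.1 = 0)).map Prod.snd).sum)
          :: pvRuns (xs.dropWhile (fun y => y.1 = 0))
      else x :: pvRuns xs := by
  rw [pvRuns]

-- the bridge: A's merge fold from a one-element seed equals B's run grouping.
theorem foldl_stepA_eq_runs (l : List (Int × Int)) (y : Int × Int) :
    l.foldl pvStepA [y] = pvRuns (y :: l) := by
  induction l generalizing y with
  | nil =>
      rcases y with ⟨a, b⟩
      rw [pvRuns_cons]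
      by_cases hy : a = 0
      · subst hy; simp [pvRuns_nil]
      · simp [hy, pvRuns_nil]
  | cons i l ih =>
      rcases y with ⟨a, b⟩
      rcases i with ⟨c, d⟩
      simp only [List.foldl_cons, stepA_singleton]
      split_ifs with h
      · obtain ⟨ha, hc⟩ := h
        subst ha; subst hc
        rw [ih]
        rw [pvRuns_cons, pvRuns_cons]
        simp [add_assoc]
      · rw [foldl_stepA_prefix l [(a, b)] (c, d), ih (c, d)]
        rw [pvRuns_cons (x := (a, b))]
        by_cases ha : a = 0
        · have hc : ¬ c = 0 := fun hc => h ⟨ha, hc⟩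
          subst ha
          simp [hc]
        · simp [ha]

theorem cigarmerge_eq_alt (ct : List (Int × Int)) (indel skip hard pad : Int) (match_ : String) :
    cigarmerge ct indel skip hard pad match_ = cigarmerge_alt ct indel skip hard pad match_ := by
  cases ct with
  | nil => simp [cigarmerge, cigarmerge_alt, pvRuns_nil]
  | cons x rest =>
      rw [cigarmerge_as_foldl]
      unfold cigarmerge_alt
      simp only [List.drop_succ_cons, List.drop_zero, List.take_succ_cons, List.take_zero,
                 List.singleton_append]
      rw [foldl_stepA_eq_runs]

-- ===== VERDICT (by name: the statement is the Claim_ definition above) =====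
theorem cigarmerge_spec : Claim_equal_cigarmerge := by
  intro ct indel skip hard pad match_ _
  exact cigarmerge_eq_alt ct indel skip hard pad match_
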